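-- pv_equiv track=rewrite | github.com/LovenSar/Renamer | renamer.py | _is_generic_data_name
-- ===== SOURCE A (Python) =====
-- def _is_generic_data_name(name):
--     if not name:
--         return True
--     name = name.lower()
--     return any(name.startswith(p) for p in [
--         'off_', 'unk_', 'byte_', 'word_', 'dword_', 'qword_',
--         'asc_', 'wstr_', 'dbl_', 'flt_', 'stru_', 'tbl_',
--         'dat_', 'data_'
--     ])
-- ===== SOURCE B (Python) =====
-- _GENERIC_PREFIXES = frozenset([
--     'off_', 'unk_', 'byte_', 'word_', 'dword_', 'qword_',
--     'asc_', 'wstr_', 'dbl_', 'flt_', 'stru_', 'tbl_',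
--     'dat_', 'data_'
-- ])
--
--
-- def _is_generic_data_name(name):
--     if not name:
--         return True
--     key = []
--     for ch in name:
--         key.append(ch.lower())
--         if ch == '_':
--             return ''.join(key) in _GENERIC_PREFIXES
--     return False
-- ===== Notes on version B (the rewrite author's own statement) =====
-- stated objective: alternative
-- what changed: Replaces the any(startswith p)-over-14-prefixes scan with a single left-to-right character walk that lowercases on the fly, stops at the first underscore, and tests the accumulated key with one frozenset membership lookup (valid because every generic prefix ends at its first and only underscore); names without an underscore return False without ever touching the prefix table.
import Mathlib
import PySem

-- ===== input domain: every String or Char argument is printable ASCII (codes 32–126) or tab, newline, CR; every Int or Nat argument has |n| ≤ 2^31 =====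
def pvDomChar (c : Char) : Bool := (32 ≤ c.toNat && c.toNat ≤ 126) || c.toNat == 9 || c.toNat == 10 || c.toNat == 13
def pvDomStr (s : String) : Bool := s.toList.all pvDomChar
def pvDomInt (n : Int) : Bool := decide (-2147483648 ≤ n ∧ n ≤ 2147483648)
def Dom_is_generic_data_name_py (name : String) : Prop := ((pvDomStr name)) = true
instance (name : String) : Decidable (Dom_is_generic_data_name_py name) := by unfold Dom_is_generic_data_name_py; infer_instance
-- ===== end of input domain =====

-- B replaces the any(startswith)-over-14-prefixes scan with one left-to-right
-- character walk that lowercases on the fly, stops at the first underscore and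
-- does a single set lookup on the accumulated key.


-- ===== PORT A =====
def pvPrefixes : List String :=
  ["off_", "unk_", "byte_", "word_", "dword_", "qword_",
   "asc_", "wstr_", "dbl_", "flt_", "stru_", "tbl_",
   "dat_", "data_"]

def is_generic_data_name_py (name : String) : Bool :=
  if name.toList.isEmpty then true
  else
    let name := PySem.Str.lower name
    pvPrefixes.any (fun p => PySem.Str.startswith name p)

-- ===== PORT B =====
def pvGenericPrefixSet : PySem.Set String :=
  PySem.Set.ofList
    ["off_", "unk_", "byte_", "word_", "dword_", "qword_",
     "asc_", "wstr_", "dbl_", "flt_", "stru_", "tbl_",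
     "dat_", "data_"]

-- the for-loop of Source B: key is the accumulator, ch the current character
def pvScanKey : List Char → List Char → Bool
  | [], _ => false
  | ch :: rest, key =>
      let key' := key ++ [PySem.Chars.lowerChar ch]
      if ch = '_' then PySem.Set.contains pvGenericPrefixSet (String.ofList key')
      else pvScanKey rest key'

def is_generic_data_name_py_alt (name : String) : Bool :=
  if name.toList.isEmpty then true
  else pvScanKey name.toList []

-- ===== PRECONDITION & SPEC =====
def Spec_is_generic_data_name_py (name : String) (out : Bool) : Prop := out = is_generic_data_name_py_alt name
instance (name : String) (out : Bool) : Decidable (Spec_is_generic_data_name_py name out) := by unfold Spec_is_generic_data_name_py; infer_instance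

-- ===== CLAIM (what is proved, stated in full; the proofs are below) =====
def Claim_equal_is_generic_data_name_py : Prop := ∀ (name : String), Dom_is_generic_data_name_py name → Spec_is_generic_data_name_py name (is_generic_data_name_py name)

-- ===== LEMMAS AND PROOFS =====

theorem pv_lowerChar_eq_underscore (c : Char) (h : PySem.Chars.lowerChar c = '_') :
    c = '_' := by
  unfold PySem.Chars.lowerChar at h
  split_ifs at h with hu
  · exfalso
    unfold PySem.Chars.isupper at hu
    simp only [Bool.and_eq_true, decide_eq_true_eq, Char.le_def] at hu
    have hb : 65 ≤ c.toNat ∧ c.toNat ≤ 90 := ⟨hu.1, hu.2⟩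
    have h2 : (Char.ofNat (c.toNat + 32)).toNat = ('_' : Char).toNat := by rw [h]
    have hval : (Char.ofNat (c.toNat + 32)).toNat = c.toNat + 32 := by
      unfold Char.ofNat
      rw [dif_pos (Or.inl (by omega : c.toNat + 32 < 55296) : Nat.isValidChar (c.toNat + 32))]
      rfl
    rw [hval] at h2
    simp only [show ('_' : Char).toNat = 95 from rfl] at h2
    omega
  · exact h

theorem pv_scan_iff (L acc : List Char) :
    pvScanKey L acc = true ↔
      ∃ q t, L = q ++ '_' :: t ∧ '_' ∉ q ∧
        PySem.Set.contains pvGenericPrefixSet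
          (String.ofList (acc ++ (q ++ ['_']).map PySem.Chars.lowerChar)) = true := by
  induction L generalizing acc with
  | nil =>
      simp only [pvScanKey]
      constructor
      · intro h; exact absurd h (by simp)
      · rintro ⟨q, t, h, -, -⟩; exact absurd h (by simp)
  | cons c rest ih =>
      by_cases hc : c = '_'
      · subst hc
        rw [show pvScanKey ('_' :: rest) acc =
            PySem.Set.contains pvGenericPrefixSet
              (String.ofList (acc ++ [PySem.Chars.lowerChar '_'])) from by
          simp [pvScanKey]]
        constructor
        · intro h
          exact ⟨[], rest, rfl, by simp, by simpa using h⟩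
        · rintro ⟨q, t, heq, hnu, hcont⟩
          match q, heq with
          | [], heq =>
              simpa using hcont
          | d :: q', heq =>
              rw [List.cons_append] at heq
              injection heq with h1 h2
              exact absurd (h1 ▸ List.mem_cons_self) hnu
      · rw [show pvScanKey (c :: rest) acc =
            pvScanKey rest (acc ++ [PySem.Chars.lowerChar c]) from by
          simp [pvScanKey, hc]]
        rw [ih]
        constructor
        · rintro ⟨q, t, heq, hnu, hcont⟩
          refine ⟨c :: q, t, by rw [heq, List.cons_append], ?_, ?_⟩
          · intro hmem
            rcases List.mem_cons.mp hmem with h | h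
            · exact hc h.symm
            · exact hnu h
          · have : acc ++ [PySem.Chars.lowerChar c] ++ (q ++ ['_']).map PySem.Chars.lowerChar
                = acc ++ ((c :: q ++ ['_']).map PySem.Chars.lowerChar) := by
              simp
            rwa [this] at hcont
        · rintro ⟨q, t, heq, hnu, hcont⟩
          match q, heq with
          | [], heq =>
              rw [List.nil_append] at heq
              injection heq with h1 h2
              exact absurd h1 hc
          | d :: q', heq =>
              rw [List.cons_append] at heq
              injection heq with h1 h2
              subst h1
              refine ⟨q', t, h2, fun h => hnu (List.mem_cons_of_mem _ h), ?_⟩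
              have : acc ++ [PySem.Chars.lowerChar c] ++ (q' ++ ['_']).map PySem.Chars.lowerChar
                  = acc ++ ((c :: q' ++ ['_']).map PySem.Chars.lowerChar) := by
                simp
              rwa [this]

theorem pv_main (name : String) :
    is_generic_data_name_py name = is_generic_data_name_py_alt name := by
  unfold is_generic_data_name_py is_generic_data_name_py_alt
  by_cases h0 : name.toList.isEmpty
  · simp [h0]
  · simp only [h0, Bool.false_eq_true, if_false]
    set L : List Char := name.toList with hL
    rw [Bool.eq_iff_iff, pv_scan_iff]
    constructor
    · intro hA
      rw [List.any_eq_true] at hA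
      obtain ⟨p, hpmem, hps⟩ := hA
      rw [PySem.Str.startswith_eq, PySem.Chars.startswith_iff, PySem.Str.toList_lower] at hps
      have hshape : ∀ p ∈ pvPrefixes,
          p.toList.dropLast ++ ['_'] = p.toList ∧ '_' ∉ p.toList.dropLast ∧
          p.toList.map PySem.Chars.lowerChar = p.toList ∧
          PySem.Set.contains pvGenericPrefixSet p = true := by decide
      obtain ⟨hsplit, hnu, hfix, hcont⟩ := hshape p hpmem
      obtain ⟨r, hr⟩ := hps
      have hmapL : L.map PySem.Chars.lowerChar = p.toList.dropLast ++ '_' :: r := by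
        rw [show PySem.Chars.lower L = L.map PySem.Chars.lowerChar from rfl] at hr
        rw [← hr, ← hsplit]; simp
      obtain ⟨q, t', hLsplit, hq1, ht1⟩ := List.map_eq_append_iff.mp hmapL
      match t', ht1 with
      | c :: t, ht1 =>
        have hc : c = '_' :=
          pv_lowerChar_eq_underscore c (by simpa using congrArg List.head? ht1)
        subst hc
        refine ⟨q, t, hLsplit, ?_, ?_⟩
        · intro hmem
          have : '_' ∈ q.map PySem.Chars.lowerChar :=
            List.mem_map.mpr ⟨'_', hmem, rfl⟩
          rw [hq1] at this
          exact hnu this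
        · have hkey : ([] : List Char) ++ (q ++ ['_']).map PySem.Chars.lowerChar = p.toList := by
            rw [List.nil_append, List.map_append, hq1]
            rw [show (['_'] : List Char).map PySem.Chars.lowerChar = ['_'] from rfl]
            exact hsplit
          rw [hkey, show String.ofList p.toList = p by simp]
          exact hcont
    · rintro ⟨q, t, hLsplit, hnu, hcont⟩
      set key : String := String.ofList (([] : List Char) ++ (q ++ ['_']).map PySem.Chars.lowerChar) with hkey
      have hmem : key ∈ pvPrefixes := by
        have : key ∈ pvGenericPrefixSet := by
          simpa [PySem.Set.contains] using hcont
        simpa [pvGenericPrefixSet, PySem.Set.mem_ofList, pvPrefixes] using this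
      rw [List.any_eq_true]
      refine ⟨key, hmem, ?_⟩
      rw [PySem.Str.startswith_eq, PySem.Chars.startswith_iff, PySem.Str.toList_lower]
      rw [show PySem.Chars.lower L = L.map PySem.Chars.lowerChar from rfl]
      refine ⟨t.map PySem.Chars.lowerChar, ?_⟩
      rw [hkey, show (String.ofList (([] : List Char) ++ (q ++ ['_']).map PySem.Chars.lowerChar)).toList
            = ([] : List Char) ++ (q ++ ['_']).map PySem.Chars.lowerChar by simp]
      rw [hLsplit]
      simp [show PySem.Chars.lowerChar '_' = '_' from rfl]

-- ===== VERDICT (by name: the statement is the Claim_ definition above) =====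
theorem is_generic_data_name_py_spec : Claim_equal_is_generic_data_name_py := by
  intro name _
  unfold Spec_is_generic_data_name_py
  exact pv_main name
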